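-- pv_equiv track=rewrite | github.com/FreedomIntelligence/Tiermem | src/evaluation/analyze_router_stats.py | compare_s_vs_r
-- ===== SOURCE A (Python) =====
-- from typing import Dict, List, Tuple, Optional
--
-- def compare_s_vs_r(s_eval_data: Dict[str, Dict[str, Dict]],
--                    r_eval_data: Dict[str, Dict[str, Dict]]) -> Dict:
--     """
--     比较 S 和 R 的结果
--
--     Returns:
--         包含四种情况的统计：S对R对、S对R错、S错R对、S错R错
--     """
--     comparison_stats = {
--         "S_correct_R_correct": 0,  # S对R对
--         "S_correct_R_wrong": 0,    # S对R错
--         "S_wrong_R_correct": 0,    # S错R对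
--         "S_wrong_R_wrong": 0,      # S错R错
--         "total_matched": 0          # 总共匹配到的记录数
--     }
--
--     # 遍历所有 session_id 和 query_id
--     all_keys = set()
--     for session_id in s_eval_data.keys():
--         all_keys.update((session_id, qid) for qid in s_eval_data[session_id].keys())
--     for session_id in r_eval_data.keys():
--         all_keys.update((session_id, qid) for qid in r_eval_data[session_id].keys())
--
--     for session_id, query_id in all_keys:
--         s_detail = s_eval_data.get(session_id, {}).get(query_id)
--         r_detail = r_eval_data.get(session_id, {}).get(query_id)
--
--         # 只有当两个都存在时才进行比较
--         if s_detail is None or r_detail is None: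
--             continue
--
--         # 获取 llm_judge_score（1表示正确，0表示错误）
--         s_score = s_detail.get("llm_judge_score", None)
--         r_score = r_detail.get("llm_judge_score", None)
--
--         # 如果两个都有分数，则进行比较
--         if s_score is not None and r_score is not None:
--             s_correct = (s_score == 1)
--             r_correct = (r_score == 1)
--
--             comparison_stats["total_matched"] += 1
--
--             if s_correct and r_correct:
--                 comparison_stats["S_correct_R_correct"] += 1
--             elif s_correct and not r_correct:
--                 comparison_stats["S_correct_R_wrong"] += 1
--             elif not s_correct and r_correct:
--                 comparison_stats["S_wrong_R_correct"] += 1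
--             else:
--                 comparison_stats["S_wrong_R_wrong"] += 1
--
--     return comparison_stats
-- ===== SOURCE B (Python) =====
-- def compare_s_vs_r(s_eval_data, r_eval_data):
--     s_cc = s_cw = s_wc = s_ww = total = 0
--     for session_id, s_queries in s_eval_data.items():
--         r_queries = r_eval_data.get(session_id)
--         if r_queries is None:
--             continue
--         for query_id, s_detail in s_queries.items():
--             r_detail = r_queries.get(query_id)
--             if r_detail is None:
--                 continue
--             s_score = s_detail.get("llm_judge_score")
--             r_score = r_detail.get("llm_judge_score")
--             if s_score is None or r_score is None:
--                 continue
--             total += 1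
--             if s_score == 1:
--                 if r_score == 1:
--                     s_cc += 1
--                 else:
--                     s_cw += 1
--             else:
--                 if r_score == 1:
--                     s_wc += 1
--                 else:
--                     s_ww += 1
--     return {
--         "S_correct_R_correct": s_cc,
--         "S_correct_R_wrong": s_cw,
--         "S_wrong_R_correct": s_wc,
--         "S_wrong_R_wrong": s_ww,
--         "total_matched": total,
--     }
-- ===== Notes on version B (the rewrite author's own statement) =====
-- stated objective: simpler
-- what changed: Replaced A's build-a-set-of-all-(session,query)-key-pairs-then-rescan-with-double-.get by a direct nested traversal of s_eval_data with plain integer counters (r looked up once per session, the result dict built once at the end), so the key-pair set and the repeated per-pair dict lookups disappear.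
import Mathlib
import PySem

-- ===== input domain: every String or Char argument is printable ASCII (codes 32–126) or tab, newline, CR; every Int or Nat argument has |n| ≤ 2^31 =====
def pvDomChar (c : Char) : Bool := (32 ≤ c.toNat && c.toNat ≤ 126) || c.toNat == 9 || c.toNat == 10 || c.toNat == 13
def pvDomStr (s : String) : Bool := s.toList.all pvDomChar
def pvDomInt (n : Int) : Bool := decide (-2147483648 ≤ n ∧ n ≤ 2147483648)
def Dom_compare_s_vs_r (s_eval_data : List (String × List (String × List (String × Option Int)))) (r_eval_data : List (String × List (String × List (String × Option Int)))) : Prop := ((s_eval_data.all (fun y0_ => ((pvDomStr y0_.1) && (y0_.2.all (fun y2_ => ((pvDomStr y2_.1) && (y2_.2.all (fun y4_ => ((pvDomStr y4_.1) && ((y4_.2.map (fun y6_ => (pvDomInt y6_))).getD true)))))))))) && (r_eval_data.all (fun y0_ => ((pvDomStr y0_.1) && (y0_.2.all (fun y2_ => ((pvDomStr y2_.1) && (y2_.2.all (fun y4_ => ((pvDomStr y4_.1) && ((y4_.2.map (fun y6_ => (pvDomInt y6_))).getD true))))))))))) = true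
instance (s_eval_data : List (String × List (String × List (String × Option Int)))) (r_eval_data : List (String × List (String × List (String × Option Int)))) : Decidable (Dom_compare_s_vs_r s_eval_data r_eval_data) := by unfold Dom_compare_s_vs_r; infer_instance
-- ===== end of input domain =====

-- B replaces A's union-set of key pairs + double .get rescan by one direct nested traversal with
-- plain integer counters; equivalence is proved on association lists with unique keys (Pre_).

-- ===== PORT A =====
-- literal transliteration of A: build the union set of (session_id, query_id) pairs from both
-- dicts' keys, then scan it updating a 5-key stats dict (Python set iteration order is not
-- modelled; the counts do not depend on it).
def compare_s_vs_r (s_eval_data : List (String × List (String × List (String × Option Int)))) (r_eval_data : List (String × List (String × List (String × Option Int)))) : List (String × Int) :=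
  let stats0 : PySem.Dict String Int := PySem.Dict.mk
    [("S_correct_R_correct", 0), ("S_correct_R_wrong", 0), ("S_wrong_R_correct", 0),
     ("S_wrong_R_wrong", 0), ("total_matched", 0)]
  let allKeys1 : PySem.Set (String × String) :=
    ((PySem.Dict.mk s_eval_data).keys).foldl
      (fun acc sid => PySem.Set.update acc
        ((((PySem.Dict.mk s_eval_data).get? sid).getD []).map (fun q => (sid, q.1))))
      PySem.Set.empty
  let allKeys : PySem.Set (String × String) :=
    ((PySem.Dict.mk r_eval_data).keys).foldl
      (fun acc sid => PySem.Set.update acc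
        ((((PySem.Dict.mk r_eval_data).get? sid).getD []).map (fun q => (sid, q.1))))
      allKeys1
  let stats := allKeys.foldl (fun d p =>
    let s_detail := (PySem.Dict.mk (((PySem.Dict.mk s_eval_data).get? p.1).getD [])).get? p.2
    let r_detail := (PySem.Dict.mk (((PySem.Dict.mk r_eval_data).get? p.1).getD [])).get? p.2
    match s_detail, r_detail with
    | some sd, some rd =>
      match ((PySem.Dict.mk sd).get? "llm_judge_score").join,
            ((PySem.Dict.mk rd).get? "llm_judge_score").join with
      | some ss, some rs =>
        let s_correct := ss == 1
        let r_correct := rs == 1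
        let d := d.insert "total_matched" (d.getD "total_matched" 0 + 1)
        if s_correct && r_correct then
          d.insert "S_correct_R_correct" (d.getD "S_correct_R_correct" 0 + 1)
        else if s_correct && !r_correct then
          d.insert "S_correct_R_wrong" (d.getD "S_correct_R_wrong" 0 + 1)
        else if !s_correct && r_correct then
          d.insert "S_wrong_R_correct" (d.getD "S_wrong_R_correct" 0 + 1)
        else
          d.insert "S_wrong_R_wrong" (d.getD "S_wrong_R_wrong" 0 + 1)
      | _, _ => d
    | _, _ => d) stats0
  stats.items

-- ===== PORT B =====
-- literal transliteration of Source B: nested traversal of s_eval_data, five integer counters,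
-- result dict built once at the end.
def compare_s_vs_r_alt (s_eval_data : List (String × List (String × List (String × Option Int)))) (r_eval_data : List (String × List (String × List (String × Option Int)))) : List (String × Int) :=
  let st := s_eval_data.foldl (fun st p =>
    match (PySem.Dict.mk r_eval_data).get? p.1 with
    | none => st
    | some r_queries =>
      p.2.foldl (fun st q =>
        match (PySem.Dict.mk r_queries).get? q.1 with
        | none => st
        | some r_detail =>
          match (((PySem.Dict.mk q.2).get? "llm_judge_score").join : Option Int) with
          | none => st
          | some ss =>
            match (((PySem.Dict.mk r_detail).get? "llm_judge_score").join : Option Int) with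
            | none => st
            | some rs =>
              if ss == 1 then
                if rs == 1 then (st.1 + 1, st.2.1, st.2.2.1, st.2.2.2.1, st.2.2.2.2 + 1)
                else (st.1, st.2.1 + 1, st.2.2.1, st.2.2.2.1, st.2.2.2.2 + 1)
              else
                if rs == 1 then (st.1, st.2.1, st.2.2.1 + 1, st.2.2.2.1, st.2.2.2.2 + 1)
                else (st.1, st.2.1, st.2.2.1, st.2.2.2.1 + 1, st.2.2.2.2 + 1)) st)
    ((0, 0, 0, 0, 0) : Int × Int × Int × Int × Int)
  [("S_correct_R_correct", st.1), ("S_correct_R_wrong", st.2.1),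
   ("S_wrong_R_correct", st.2.2.1), ("S_wrong_R_wrong", st.2.2.2.1),
   ("total_matched", st.2.2.2.2)]

-- ===== PRECONDITION & SPEC =====
-- Pre_ excludes association lists with duplicate keys at the two dict levels the traversals read:
-- such lists do not represent any Python dict (dict keys are unique), and there A's set-dedup and
-- B's direct iteration would read different entries.
def Pre_compare_s_vs_r (s_eval_data : List (String × List (String × List (String × Option Int)))) (r_eval_data : List (String × List (String × List (String × Option Int)))) : Prop :=
  (s_eval_data.map Prod.fst).Nodup ∧ (r_eval_data.map Prod.fst).Nodup ∧
  (∀ p ∈ s_eval_data, (p.2.map Prod.fst).Nodup) ∧ (∀ p ∈ r_eval_data, (p.2.map Prod.fst).Nodup)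
instance (s_eval_data : List (String × List (String × List (String × Option Int)))) (r_eval_data : List (String × List (String × List (String × Option Int)))) : Decidable (Pre_compare_s_vs_r s_eval_data r_eval_data) := by unfold Pre_compare_s_vs_r; infer_instance

def pvWitness_compare_s_vs_r : (List (String × List (String × List (String × Option Int)))) × (List (String × List (String × List (String × Option Int)))) :=
  ([("s1", [("q1", [("llm_judge_score", some 1)]), ("q2", [("llm_judge_score", some 0)])])],
   [("s1", [("q1", [("llm_judge_score", some 0)])]), ("s2", [("q1", [("llm_judge_score", none)])])])

def Spec_compare_s_vs_r (s_eval_data : List (String × List (String × List (String × Option Int)))) (r_eval_data : List (String × List (String × List (String × Option Int)))) (out : List (String × Int)) : Prop := out = compare_s_vs_r_alt s_eval_data r_eval_data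
instance (s_eval_data : List (String × List (String × List (String × Option Int)))) (r_eval_data : List (String × List (String × List (String × Option Int)))) (out : List (String × Int)) : Decidable (Spec_compare_s_vs_r s_eval_data r_eval_data out) := by unfold Spec_compare_s_vs_r; infer_instance

-- ===== CLAIM (what is proved, stated in full; the proofs are below) =====
def Claim_equal_compare_s_vs_r : Prop := ∀ (s_eval_data : List (String × List (String × List (String × Option Int)))) (r_eval_data : List (String × List (String × List (String × Option Int)))), Dom_compare_s_vs_r s_eval_data r_eval_data → Pre_compare_s_vs_r s_eval_data r_eval_data → Spec_compare_s_vs_r s_eval_data r_eval_data (compare_s_vs_r s_eval_data r_eval_data)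

-- ===== LEMMAS AND PROOFS =====
abbrev pvEval := List (String × List (String × List (String × Option Int)))
abbrev pvSt := Int × Int × Int × Int × Int

def pvClassify (s r : pvEval) (p : String × String) : Option (Bool × Bool) :=
  match (PySem.Dict.mk (((PySem.Dict.mk s).get? p.1).getD [])).get? p.2,
        (PySem.Dict.mk (((PySem.Dict.mk r).get? p.1).getD [])).get? p.2 with
  | some sd, some rd =>
    match (((PySem.Dict.mk sd).get? "llm_judge_score").join : Option Int),
          (((PySem.Dict.mk rd).get? "llm_judge_score").join : Option Int) with
    | some ss, some rs => some (ss == 1, rs == 1)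
    | _, _ => none
  | _, _ => none

def pvBump (st : pvSt) (c : Bool × Bool) : pvSt :=
  match c with
  | (true, true)   => (st.1 + 1, st.2.1, st.2.2.1, st.2.2.2.1, st.2.2.2.2 + 1)
  | (true, false)  => (st.1, st.2.1 + 1, st.2.2.1, st.2.2.2.1, st.2.2.2.2 + 1)
  | (false, true)  => (st.1, st.2.1, st.2.2.1 + 1, st.2.2.2.1, st.2.2.2.2 + 1)
  | (false, false) => (st.1, st.2.1, st.2.2.1, st.2.2.2.1 + 1, st.2.2.2.2 + 1)

def pvStep (s r : pvEval) (st : pvSt) (p : String × String) : pvSt :=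
  match pvClassify s r p with
  | none => st
  | some c => pvBump st c

def pvOut (st : pvSt) : List (String × Int) :=
  [("S_correct_R_correct", st.1), ("S_correct_R_wrong", st.2.1),
   ("S_wrong_R_correct", st.2.2.1), ("S_wrong_R_wrong", st.2.2.2.1),
   ("total_matched", st.2.2.2.2)]

def pvDictOf (st : pvSt) : PySem.Dict String Int :=
  PySem.Dict.mk [("S_correct_R_correct", st.1), ("S_correct_R_wrong", st.2.1),
    ("S_wrong_R_correct", st.2.2.1), ("S_wrong_R_wrong", st.2.2.2.1),
    ("total_matched", st.2.2.2.2)]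

def pvAstep (s_eval_data r_eval_data : pvEval) (d : PySem.Dict String Int) (p : String × String) : PySem.Dict String Int :=
    let s_detail := (PySem.Dict.mk (((PySem.Dict.mk s_eval_data).get? p.1).getD [])).get? p.2
    let r_detail := (PySem.Dict.mk (((PySem.Dict.mk r_eval_data).get? p.1).getD [])).get? p.2
    match s_detail, r_detail with
    | some sd, some rd =>
      match ((PySem.Dict.mk sd).get? "llm_judge_score").join,
            ((PySem.Dict.mk rd).get? "llm_judge_score").join with
      | some ss, some rs =>
        let s_correct := ss == 1
        let r_correct := rs == 1
        let d := d.insert "total_matched" (d.getD "total_matched" 0 + 1)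
        if s_correct && r_correct then
          d.insert "S_correct_R_correct" (d.getD "S_correct_R_correct" 0 + 1)
        else if s_correct && !r_correct then
          d.insert "S_correct_R_wrong" (d.getD "S_correct_R_wrong" 0 + 1)
        else if !s_correct && r_correct then
          d.insert "S_wrong_R_correct" (d.getD "S_wrong_R_correct" 0 + 1)
        else
          d.insert "S_wrong_R_wrong" (d.getD "S_wrong_R_wrong" 0 + 1)
      | _, _ => d
    | _, _ => d

def pvAllKeys (s_eval_data r_eval_data : pvEval) : PySem.Set (String × String) :=
  let allKeys1 : PySem.Set (String × String) :=
    ((PySem.Dict.mk s_eval_data).keys).foldl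
      (fun acc sid => PySem.Set.update acc
        ((((PySem.Dict.mk s_eval_data).get? sid).getD []).map (fun q => (sid, q.1))))
      PySem.Set.empty
  ((PySem.Dict.mk r_eval_data).keys).foldl
    (fun acc sid => PySem.Set.update acc
      ((((PySem.Dict.mk r_eval_data).get? sid).getD []).map (fun q => (sid, q.1))))
    allKeys1

def pvLB (s_eval_data : pvEval) : List (String × String) :=
  s_eval_data.flatMap (fun p => p.2.map (fun q => (p.1, q.1)))

lemma pvA_as_fold (s r : pvEval) :
    compare_s_vs_r s r = ((pvAllKeys s r).foldl (pvAstep s r) (pvDictOf (0,0,0,0,0))).items := rfl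

lemma pvAstep_eq (s r : pvEval) (st : pvSt) (p : String × String) :
    pvAstep s r (pvDictOf st) p = pvDictOf (pvStep s r st p) := by
  unfold pvAstep pvStep pvClassify
  cases hs : (PySem.Dict.mk (((PySem.Dict.mk s).get? p.1).getD [])).get? p.2 with
  | none => rfl
  | some sd =>
    cases hr : (PySem.Dict.mk (((PySem.Dict.mk r).get? p.1).getD [])).get? p.2 with
    | none => rfl
    | some rd =>
      cases hss : (((PySem.Dict.mk sd).get? "llm_judge_score").join : Option Int) with
      | none => simp only [hss]
      | some ss =>
        cases hrs : (((PySem.Dict.mk rd).get? "llm_judge_score").join : Option Int) with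
        | none => simp only [hss, hrs]
        | some rs =>
          simp only [hss, hrs]
          cases hb1 : (ss == 1) <;> cases hb2 : (rs == 1) <;> rfl

lemma pvFoldA (s r : pvEval) (l : List (String × String)) : ∀ st : pvSt,
    l.foldl (pvAstep s r) (pvDictOf st) = pvDictOf (l.foldl (pvStep s r) st) := by
  induction l with
  | nil => intro st; rfl
  | cons p t ih => intro st; simp only [List.foldl_cons, pvAstep_eq]; exact ih _

def pvBinner (r_queries : List (String × List (String × Option Int)))
    (st : pvSt) (q : String × List (String × Option Int)) : pvSt :=
  match (PySem.Dict.mk r_queries).get? q.1 with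
  | none => st
  | some r_detail =>
    match (((PySem.Dict.mk q.2).get? "llm_judge_score").join : Option Int) with
    | none => st
    | some ss =>
      match (((PySem.Dict.mk r_detail).get? "llm_judge_score").join : Option Int) with
      | none => st
      | some rs =>
        if ss == 1 then
          if rs == 1 then (st.1 + 1, st.2.1, st.2.2.1, st.2.2.2.1, st.2.2.2.2 + 1)
          else (st.1, st.2.1 + 1, st.2.2.1, st.2.2.2.1, st.2.2.2.2 + 1)
        else
          if rs == 1 then (st.1, st.2.1, st.2.2.1 + 1, st.2.2.2.1, st.2.2.2.2 + 1)
          else (st.1, st.2.1, st.2.2.1, st.2.2.2.1 + 1, st.2.2.2.2 + 1)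

def pvBouter (r_eval_data : pvEval) (st : pvSt) (p : String × List (String × List (String × Option Int))) : pvSt :=
  match (PySem.Dict.mk r_eval_data).get? p.1 with
  | none => st
  | some r_queries => p.2.foldl (pvBinner r_queries) st

lemma pvB_as_fold (s r : pvEval) :
    compare_s_vs_r_alt s r = pvOut (s.foldl (pvBouter r) (0,0,0,0,0)) := rfl

lemma pvStep_none {s r : pvEval} {p : String × String} (hc : pvClassify s r p = none) (st : pvSt) :
    pvStep s r st p = st := by simp [pvStep, hc]

lemma pvGet?_nil {ν : Type} (k : String) :
    (PySem.Dict.mk ([] : List (String × ν))).get? k = none := rfl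

lemma pvClassify_r_none {s r : pvEval} {p : String × String}
    (hr : (PySem.Dict.mk r).get? p.1 = none) : pvClassify s r p = none := by
  unfold pvClassify
  simp only [hr, Option.getD_none, pvGet?_nil]
  cases (PySem.Dict.mk (((PySem.Dict.mk s).get? p.1).getD [])).get? p.2 <;> rfl

lemma pvInner_none {s r : pvEval} {sid : String} (hr : (PySem.Dict.mk r).get? sid = none)
    (inner : List (String × List (String × Option Int))) : ∀ st : pvSt,
    (inner.map (fun q => (sid, q.1))).foldl (pvStep s r) st = st := by
  induction inner with
  | nil => intro st; rfl
  | cons q t ih =>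
    intro st
    simp only [List.map_cons, List.foldl_cons, pvStep_none (pvClassify_r_none (p := (sid, q.1)) hr)]
    exact ih st

lemma pvInner_eq (s r : pvEval) (sid : String)
    (rq : List (String × List (String × Option Int)))
    (hr : (PySem.Dict.mk r).get? sid = some rq)
    (inner : List (String × List (String × Option Int)))
    (Hq : ∀ q ∈ inner, (PySem.Dict.mk (((PySem.Dict.mk s).get? sid).getD [])).get? q.1 = some q.2) :
    ∀ st : pvSt, inner.foldl (pvBinner rq) st = (inner.map (fun q => (sid, q.1))).foldl (pvStep s r) st := by
  induction inner with
  | nil => intro st; rfl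
  | cons q t ih =>
    intro st
    simp only [List.map_cons, List.foldl_cons]
    have hq := Hq q (by simp)
    have hstep : pvBinner rq st q = pvStep s r st (sid, q.1) := by
      unfold pvBinner pvStep pvClassify
      simp only [hq, hr, Option.getD_some]
      cases hrd : (PySem.Dict.mk rq).get? q.1 with
      | none => rfl
      | some rdetail =>
        cases hss : (((PySem.Dict.mk q.2).get? "llm_judge_score").join : Option Int) with
        | none => simp only [hss]
        | some ss =>
          cases hrs : (((PySem.Dict.mk rdetail).get? "llm_judge_score").join : Option Int) with
          | none => simp only [hss, hrs]
          | some rs =>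
            simp only [hss, hrs]
            cases hb1 : (ss == 1) <;> cases hb2 : (rs == 1) <;> rfl
    rw [hstep]
    exact ih (fun q hq' => Hq q (by simp [hq'])) _

lemma pvOuter (s r : pvEval) : ∀ (t : pvEval),
    (∀ p ∈ t, (PySem.Dict.mk s).get? p.1 = some p.2) →
    (∀ p ∈ t, ∀ q ∈ p.2, (PySem.Dict.mk (((PySem.Dict.mk s).get? p.1).getD [])).get? q.1 = some q.2) →
    ∀ st : pvSt, t.foldl (pvBouter r) st
      = (t.flatMap (fun p => p.2.map (fun q => (p.1, q.1)))).foldl (pvStep s r) st := by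
  intro t
  induction t with
  | nil => intro _ _ st; rfl
  | cons p t ih =>
    intro H1 H2 st
    simp only [List.flatMap_cons, List.foldl_append, List.foldl_cons]
    have hhead : pvBouter r st p = (p.2.map (fun q => (p.1, q.1))).foldl (pvStep s r) st := by
      unfold pvBouter
      cases hrq : (PySem.Dict.mk r).get? p.1 with
      | none => exact (pvInner_none hrq p.2 st).symm
      | some rq => exact pvInner_eq s r p.1 rq hrq p.2 (H2 p (by simp)) st
    rw [hhead]
    exact ih (fun x hx => H1 x (by simp [hx])) (fun x hx => H2 x (by simp [hx])) _

lemma pvFold_filter (s r : pvEval) (l : List (String × String)) : ∀ st : pvSt,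
    l.foldl (pvStep s r) st
      = (l.filter (fun p => (pvClassify s r p).isSome)).foldl (pvStep s r) st := by
  induction l with
  | nil => intro st; rfl
  | cons p t ih =>
    intro st
    cases hc : pvClassify s r p with
    | none =>
      simp only [List.foldl_cons, List.filter_cons, hc, Option.isSome_none, pvStep_none hc]
      exact ih st
    | some c =>
      simp only [List.foldl_cons, List.filter_cons, hc, Option.isSome_some, if_true]
      exact ih _

lemma pvStep_comm (s r : pvEval) (st : pvSt) (p q : String × String) :
    pvStep s r (pvStep s r st p) q = pvStep s r (pvStep s r st q) p := by
  unfold pvStep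
  cases hp : pvClassify s r p with
  | none => rfl
  | some c =>
    cases hq : pvClassify s r q with
    | none => rfl
    | some c' =>
      rcases c with ⟨b1, b2⟩; rcases c' with ⟨b3, b4⟩
      cases b1 <;> cases b2 <;> cases b3 <;> cases b4 <;> rfl

lemma pvMem_foldl_update {α β : Type} [BEq α] [LawfulBEq α] (f : β → List α) (l : List β) :
    ∀ (init : PySem.Set α) (y : α),
      y ∈ l.foldl (fun acc x => PySem.Set.update acc (f x)) init ↔ y ∈ init ∨ ∃ x ∈ l, y ∈ f x := by
  induction l with
  | nil => simp
  | cons x t ih =>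
    intro init y
    simp only [List.foldl_cons, ih, PySem.Set.mem_update, List.mem_cons]
    constructor
    · rintro ((h | h) | ⟨z, hz, hy⟩)
      · exact Or.inl h
      · exact Or.inr ⟨x, Or.inl rfl, h⟩
      · exact Or.inr ⟨z, Or.inr hz, hy⟩
    · rintro (h | ⟨z, (rfl | hz), hy⟩)
      · exact Or.inl (Or.inl h)
      · exact Or.inl (Or.inr hy)
      · exact Or.inr ⟨z, hz, hy⟩

lemma pvNodup_foldl_update {α β : Type} [BEq α] [LawfulBEq α] (f : β → List α) (l : List β) :
    ∀ init : PySem.Set α, init.Nodup →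
      (l.foldl (fun acc x => PySem.Set.update acc (f x)) init).Nodup := by
  induction l with
  | nil => intro init h; exact h
  | cons x t ih => intro init h; exact ih _ (PySem.Set.nodup_update _ _ h)

lemma pvClassify_some_elim {s r : pvEval} {p : String × String} {c : Bool × Bool}
    (hc : pvClassify s r p = some c) :
    (∃ inner sd, (PySem.Dict.mk s).get? p.1 = some inner ∧ (PySem.Dict.mk inner).get? p.2 = some sd) ∧
    (∃ innerR rd, (PySem.Dict.mk r).get? p.1 = some innerR ∧ (PySem.Dict.mk innerR).get? p.2 = some rd) := by
  unfold pvClassify at hc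
  rcases h1 : (PySem.Dict.mk s).get? p.1 with _ | inner
  · rw [h1] at hc; simp [pvGet?_nil] at hc
  rw [h1] at hc
  rcases h1r : (PySem.Dict.mk r).get? p.1 with _ | innerR
  · rw [h1r] at hc; simp [pvGet?_nil] at hc
  rw [h1r] at hc
  simp only [Option.getD_some] at hc
  rcases h2 : (PySem.Dict.mk inner).get? p.2 with _ | sd
  · rw [h2] at hc; simp at hc
  rcases h2r : (PySem.Dict.mk innerR).get? p.2 with _ | rd
  · rw [h2, h2r] at hc; simp at hc
  exact ⟨⟨inner, sd, rfl, h2⟩, ⟨innerR, rd, rfl, h2r⟩⟩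

lemma pvMem_allKeys_of_classify {s r : pvEval} {p : String × String} {c : Bool × Bool}
    (hc : pvClassify s r p = some c) : p ∈ pvAllKeys s r := by
  obtain ⟨⟨inner, sd, h1, h2⟩, _⟩ := pvClassify_some_elim hc
  unfold pvAllKeys
  rw [pvMem_foldl_update]
  left
  rw [pvMem_foldl_update]
  right
  refine ⟨p.1, ?_, ?_⟩
  · by_contra hnm
    rw [← PySem.Dict.get?_eq_none_iff_not_mem_keys] at hnm
    rw [hnm] at h1; simp at h1
  · rw [h1, Option.getD_some]
    exact List.mem_map.mpr ⟨(p.2, sd), PySem.Dict.mem_items_of_get?_eq_some _ h2, rfl⟩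

lemma pvMem_LB_of_classify {s r : pvEval} {p : String × String} {c : Bool × Bool}
    (hnd : (s.map Prod.fst).Nodup) (hc : pvClassify s r p = some c) : p ∈ pvLB s := by
  obtain ⟨⟨inner, sd, h1, h2⟩, _⟩ := pvClassify_some_elim hc
  have hkeys : ((PySem.Dict.mk s).keys).Nodup := by simpa [PySem.Dict.keys_mk] using hnd
  have hmem : (p.1, inner) ∈ s := (PySem.Dict.get?_eq_some_iff_mem_items _ _ _ hkeys).1 h1
  exact List.mem_flatMap.mpr ⟨(p.1, inner), hmem,
    List.mem_map.mpr ⟨(p.2, sd), PySem.Dict.mem_items_of_get?_eq_some _ h2, rfl⟩⟩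

lemma pvNodup_LB (s : pvEval) (h1 : (s.map Prod.fst).Nodup)
    (h2 : ∀ p ∈ s, (p.2.map Prod.fst).Nodup) : (pvLB s).Nodup := by
  induction s with
  | nil => exact List.nodup_nil
  | cons p t ih =>
    simp only [List.map_cons, List.nodup_cons] at h1
    simp only [pvLB, List.flatMap_cons] at *
    rw [List.nodup_append]
    refine ⟨?_, ?_, ?_⟩
    · have heq : p.2.map (fun q => (p.1, q.1)) = (p.2.map Prod.fst).map (fun a => (p.1, a)) := by
        simp [List.map_map, Function.comp]
      rw [heq]
      exact (h2 p (by simp)).map (fun a b hab => by simpa using hab)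
    · exact ih h1.2 (fun x hx => h2 x (by simp [hx]))
    · intro a ha b hb hab
      obtain ⟨qa, _, rfl⟩ := List.mem_map.1 ha
      obtain ⟨x, hx, hxb⟩ := List.mem_flatMap.1 hb
      obtain ⟨qb, _, rfl⟩ := List.mem_map.1 hxb
      apply h1.1
      have hfst : p.1 = x.1 := (Prod.ext_iff.1 hab).1
      rw [hfst]
      exact List.mem_map.mpr ⟨x, hx, rfl⟩

lemma pvNodup_allKeys (s r : pvEval) : (pvAllKeys s r).Nodup := by
  unfold pvAllKeys
  exact pvNodup_foldl_update _ _ _ (pvNodup_foldl_update _ _ _ List.nodup_nil)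

theorem pvMain (s r : pvEval) (hpre : Pre_compare_s_vs_r s r) :
    compare_s_vs_r s r = compare_s_vs_r_alt s r := by
  obtain ⟨hs1, hr1, hs2, hr2⟩ := hpre
  have hkeysnd : ((PySem.Dict.mk s).keys).Nodup := by simpa [PySem.Dict.keys_mk] using hs1
  have hget : ∀ p ∈ s, (PySem.Dict.mk s).get? p.1 = some p.2 := by
    intro p hp
    exact PySem.Dict.get?_of_mem_items _ hp hkeysnd
  have hA : compare_s_vs_r s r = pvOut ((pvAllKeys s r).foldl (pvStep s r) (0,0,0,0,0)) := by
    rw [pvA_as_fold, pvFoldA]; rfl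
  have hB : compare_s_vs_r_alt s r = pvOut ((pvLB s).foldl (pvStep s r) (0,0,0,0,0)) := by
    have H2 : ∀ p ∈ s, ∀ q ∈ p.2,
        (PySem.Dict.mk (((PySem.Dict.mk s).get? p.1).getD [])).get? q.1 = some q.2 := by
      intro p hp q hq
      rw [hget p hp, Option.getD_some]
      have hnd : ((PySem.Dict.mk p.2).keys).Nodup := by simpa [PySem.Dict.keys_mk] using hs2 p hp
      exact PySem.Dict.get?_of_mem_items _ hq hnd
    rw [pvB_as_fold, pvOuter s r s hget H2]; rfl
  rw [hA, hB]
  congr 1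
  rw [pvFold_filter, pvFold_filter s r (pvLB s)]
  refine @List.Perm.foldl_eq _ _ (pvStep s r) _ _ ⟨fun st p q => pvStep_comm s r st p q⟩ ?_ (0,0,0,0,0)
  rw [List.perm_ext_iff_of_nodup ((pvNodup_allKeys s r).filter _) ((pvNodup_LB s hs1 hs2).filter _)]
  intro x
  simp only [List.mem_filter, Option.isSome_iff_exists]
  constructor
  · rintro ⟨_, c, hc⟩
    exact ⟨pvMem_LB_of_classify hs1 hc, c, hc⟩
  · rintro ⟨_, c, hc⟩
    exact ⟨pvMem_allKeys_of_classify hc, c, hc⟩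

-- ===== VERDICT (by name: the statement is the Claim_ definition above) =====
theorem compare_s_vs_r_spec : Claim_equal_compare_s_vs_r := by
  intro s r _ hpre
  exact pvMain s r hpre
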